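-- pv_equiv track=rewrite | github.com/pystatic/pystatic | pystatic/stubgen/stubgen.py | scoped_list_to_str
-- ===== SOURCE A (Python) =====
-- from typing import List, Tuple
--
-- def scoped_list_to_str(lst: List[Tuple[str, int]]):
--     if not lst:
--         return ''
--     results = [lst[0][0]]
--     prev_scope = lst[0][1]
--     for item, scope in lst[1:]:
--         if prev_scope == scope:
--             results.append(item)
--         else:
--             results.append('\n')
--             results.append(item)
--         prev_scope = scope
--
--     return ''.join(results)
-- ===== SOURCE B (Python) =====
-- from typing import List, Tuple
--
-- def scoped_list_to_str(lst: List[Tuple[str, int]]):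
--     groups = []  # list of (scope, [items]) for consecutive runs of equal scope
--     for item, scope in lst:
--         if groups and groups[-1][0] == scope:
--             groups[-1][1].append(item)
--         else:
--             groups.append((scope, [item]))
--     return '\n'.join(''.join(items) for _, items in groups)
-- ===== Notes on version B (the rewrite author's own statement) =====
-- stated objective: idiomatic
-- what changed: B first groups consecutive same-scope items into runs and then joins the runs with '\n' (and items within a run with ''), instead of A's single accumulator loop that tracks the previous scope and interleaves '\n' markers.
import Mathlib
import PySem

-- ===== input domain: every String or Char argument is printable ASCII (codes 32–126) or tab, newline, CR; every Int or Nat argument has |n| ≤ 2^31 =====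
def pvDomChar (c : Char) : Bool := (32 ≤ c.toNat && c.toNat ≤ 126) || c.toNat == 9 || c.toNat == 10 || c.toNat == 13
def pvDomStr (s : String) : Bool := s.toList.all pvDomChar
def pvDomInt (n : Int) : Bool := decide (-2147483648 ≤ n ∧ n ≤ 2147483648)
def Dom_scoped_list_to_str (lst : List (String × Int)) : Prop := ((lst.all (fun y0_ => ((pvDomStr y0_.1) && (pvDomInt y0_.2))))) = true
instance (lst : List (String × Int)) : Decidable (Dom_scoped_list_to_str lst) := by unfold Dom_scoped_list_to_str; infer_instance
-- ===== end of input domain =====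

-- B groups consecutive same-scope items into runs and joins the runs with '\n' (idiomatic grouping decomposition); A keeps one flat accumulator with a prev-scope flag. Equal return value on all inputs.


-- ===== PORT A =====
-- A: seed results with the first item, fold over the tail keeping prev_scope,
-- pushing a '\n' element whenever the scope changes; finally ''.join(results).
def scoped_list_to_str (lst : List (String × Int)) : String :=
  match lst with
  | [] => ""
  | (i0, s0) :: rest =>
    let st := rest.foldl
      (fun (st : List String × Int) p =>
        if st.2 == p.2 then (st.1 ++ [p.1], p.2) else (st.1 ++ ["\n", p.1], p.2))
      ([i0], s0)
    PySem.Str.join "" st.1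

-- ===== PORT B =====
-- B helper: append an item at the END of the run list — into the last run if its
-- scope matches, else as a new singleton run (mirrors Source B's groups[-1] update).
def pvAddItem (groups : List (Int × List String)) (item : String) (scope : Int) :
    List (Int × List String) :=
  match groups with
  | [] => [(scope, [item])]
  | [g] => if g.1 == scope then [(g.1, g.2 ++ [item])] else [g, (scope, [item])]
  | g :: gs => g :: pvAddItem gs item scope

def scoped_list_to_str_alt (lst : List (String × Int)) : String :=
  let groups := lst.foldl (fun gs p => pvAddItem gs p.1 p.2) []
  PySem.Str.join "\n" (groups.map (fun g => PySem.Str.join "" g.2))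

-- ===== PRECONDITION & SPEC =====
def Spec_scoped_list_to_str (lst : List (String × Int)) (out : String) : Prop := out = scoped_list_to_str_alt lst
instance (lst : List (String × Int)) (out : String) : Decidable (Spec_scoped_list_to_str lst out) := by unfold Spec_scoped_list_to_str; infer_instance

-- ===== CLAIM (what is proved, stated in full; the proofs are below) =====
def Claim_equal_scoped_list_to_str : Prop := ∀ (lst : List (String × Int)), Dom_scoped_list_to_str lst → Spec_scoped_list_to_str lst (scoped_list_to_str lst)

-- ===== LEMMAS AND PROOFS =====

-- rendering of the tail, at the char level, given the scope of the last emitted item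
def pvTailC (prev : Int) : List (String × Int) → List Char
  | [] => []
  | (item, scope) :: rest =>
    (if prev == scope then item.toList else '\n' :: item.toList) ++ pvTailC scope rest

-- char-level rendering of B's group list
def pvRenderC (groups : List (Int × List String)) : List Char :=
  PySem.Chars.join ['\n'] (groups.map (fun g => PySem.Chars.join [] (g.2.map String.toList)))

-- scope of the last group
def pvLastScope : List (Int × List String) → Option Int
  | [] => none
  | [g] => some g.1
  | _ :: gs => pvLastScope gs

theorem join_empty_cons (p : List Char) (rest : List (List Char)) :
    PySem.Chars.join [] (p :: rest) = p ++ PySem.Chars.join [] rest := by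
  cases rest with
  | nil => simp [PySem.Chars.join_singleton, PySem.Chars.join_nil]
  | cons q t => simp [PySem.Chars.join_cons_cons]

theorem join_empty_append (a b : List (List Char)) :
    PySem.Chars.join [] (a ++ b) = PySem.Chars.join [] a ++ PySem.Chars.join [] b := by
  induction a with
  | nil => simp [PySem.Chars.join_nil]
  | cons p t ih => simp [join_empty_cons, ih]

-- A-side invariant: joining the accumulator after the fold
theorem a_fold (rest : List (String × Int)) :
    ∀ (res : List String) (prev : Int),
    PySem.Chars.join []
        (((rest.foldl
          (fun (st : List String × Int) p =>
            if st.2 == p.2 then (st.1 ++ [p.1], p.2) else (st.1 ++ ["\n", p.1], p.2))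
          (res, prev)).1).map String.toList)
      = PySem.Chars.join [] (res.map String.toList) ++ pvTailC prev rest := by
  induction rest with
  | nil => intro res prev; simp [pvTailC]
  | cons p rest ih =>
    intro res prev
    obtain ⟨item, scope⟩ := p
    simp only [List.foldl_cons]
    by_cases h : prev == scope
    · rw [if_pos h, ih (res ++ [item]) scope]
      simp [pvTailC, h, List.map_append, join_empty_append, join_empty_cons,
        PySem.Chars.join_nil]
    · rw [if_neg h, ih (res ++ ["\n", item]) scope]
      simp [pvTailC, h, List.map_append, join_empty_append, join_empty_cons,
        PySem.Chars.join_nil]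

theorem pvAddItem_ne_nil (groups : List (Int × List String)) (item : String) (scope : Int) :
    pvAddItem groups item scope ≠ [] := by
  match groups with
  | [] => simp [pvAddItem]
  | [g] => by_cases h : g.1 == scope <;> simp [pvAddItem, h]
  | g :: g' :: gs' => simp [pvAddItem]

theorem lastScope_addItem (groups : List (Int × List String)) (item : String) (scope : Int) :
    pvLastScope (pvAddItem groups item scope) = some scope := by
  induction groups with
  | nil => simp [pvAddItem, pvLastScope]
  | cons g gs ih =>
    cases gs with
    | nil =>
      by_cases h : g.1 == scope
      · simp [pvAddItem, h, pvLastScope, eq_of_beq h]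
      · simp [pvAddItem, h, pvLastScope]
    | cons g' gs' =>
      obtain ⟨y, ys, hx⟩ := List.exists_cons_of_ne_nil (pvAddItem_ne_nil (g' :: gs') item scope)
      calc pvLastScope (pvAddItem (g :: g' :: gs') item scope)
          = pvLastScope (g :: pvAddItem (g' :: gs') item scope) := rfl
        _ = pvLastScope (g :: y :: ys) := by rw [hx]
        _ = pvLastScope (y :: ys) := rfl
        _ = some scope := by rw [← hx]; exact ih

theorem renderC_cons_of_ne_nil (g : Int × List String) (gs : List (Int × List String))
    (h : gs ≠ []) :
    pvRenderC (g :: gs)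
      = PySem.Chars.join [] (g.2.map String.toList) ++ ['\n'] ++ pvRenderC gs := by
  obtain ⟨y, ys, rfl⟩ := List.exists_cons_of_ne_nil h
  simp [pvRenderC, PySem.Chars.join_cons_cons]

theorem render_addItem (groups : List (Int × List String)) (item : String)
    (scope prev : Int) (h : pvLastScope groups = some prev) :
    pvRenderC (pvAddItem groups item scope)
      = pvRenderC groups ++ (if prev == scope then item.toList else '\n' :: item.toList) := by
  induction groups with
  | nil => simp [pvLastScope] at h
  | cons g gs ih =>
    cases gs with
    | nil =>
      have hg : g.1 = prev := by simpa [pvLastScope] using h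
      subst hg
      by_cases hs : g.1 == scope
      · rw [if_pos hs]
        simp [pvAddItem, hs, pvRenderC, PySem.Chars.join_singleton, List.map_append,
          join_empty_append, join_empty_cons, PySem.Chars.join_nil]
      · rw [if_neg hs]
        simp [pvAddItem, hs, pvRenderC, PySem.Chars.join_singleton,
          PySem.Chars.join_cons_cons]
    | cons g' gs' =>
      have h' : pvLastScope (g' :: gs') = some prev := h
      have step : pvAddItem (g :: g' :: gs') item scope
          = g :: pvAddItem (g' :: gs') item scope := rfl
      rw [step,
        renderC_cons_of_ne_nil g _ (pvAddItem_ne_nil (g' :: gs') item scope),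
        renderC_cons_of_ne_nil g (g' :: gs') (by simp),
        ih h', List.append_assoc, List.append_assoc, List.append_assoc]

-- B-side invariant: rendering the group list after the fold
theorem b_fold (rest : List (String × Int)) :
    ∀ (groups : List (Int × List String)) (prev : Int),
    pvLastScope groups = some prev →
    pvRenderC (rest.foldl (fun gs p => pvAddItem gs p.1 p.2) groups)
      = pvRenderC groups ++ pvTailC prev rest := by
  induction rest with
  | nil => intro groups prev _; simp [pvTailC]
  | cons p rest ih =>
    intro groups prev h
    obtain ⟨item, scope⟩ := p
    simp only [List.foldl_cons]
    rw [ih (pvAddItem groups item scope) scope (lastScope_addItem groups item scope),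
      render_addItem groups item scope prev h, pvTailC, List.append_assoc]

-- ===== VERDICT (by name: the statement is the Claim_ definition above) =====
theorem scoped_list_to_str_spec : Claim_equal_scoped_list_to_str := by
  intro lst _
  unfold Spec_scoped_list_to_str scoped_list_to_str scoped_list_to_str_alt
  match lst with
  | [] =>
    apply String.toList_inj.mp
    simp [PySem.Str.toList_join, PySem.Chars.join_nil]
  | (i0, s0) :: rest =>
    apply String.toList_inj.mp
    simp only [List.foldl_cons, PySem.Str.toList_join]
    have hA := a_fold rest [i0] s0
    have hB := b_fold rest [(s0, [i0])] s0 rfl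
    rw [show ("" : String).toList = [] from rfl, hA]
    rw [show pvAddItem [] i0 s0 = [(s0, [i0])] from rfl]
    have : List.map String.toList
        ((List.foldl (fun gs p => pvAddItem gs p.1 p.2) [(s0, [i0])] rest).map
          (fun g => PySem.Str.join "" g.2))
        = (List.foldl (fun gs p => pvAddItem gs p.1 p.2) [(s0, [i0])] rest).map
          (fun g => PySem.Chars.join [] (g.2.map String.toList)) := by
      simp [PySem.Str.toList_join]
    rw [show ("\n" : String).toList = ['\n'] from rfl, this]
    rw [show PySem.Chars.join ['\n']
        ((List.foldl (fun gs p => pvAddItem gs p.1 p.2) [(s0, [i0])] rest).map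
          (fun g => PySem.Chars.join [] (g.2.map String.toList)))
        = pvRenderC (List.foldl (fun gs p => pvAddItem gs p.1 p.2) [(s0, [i0])] rest) from rfl]
    rw [hB]
    simp [pvRenderC, PySem.Chars.join_singleton, join_empty_cons, PySem.Chars.join_nil]
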